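-- pv_equiv track=rewrite | github.com/ChethanPutran/LLM_training | a2p1_v0.1.py | chunk_tokens
-- ===== SOURCE A (Python) =====
-- block_size = 512
--
-- def chunk_tokens(examples):
--     concatenated = []
--     for seq in examples["input_ids"]:
--         concatenated.extend(seq)
--
--     # Calculate how many complete blocks we can create
--     total_length = (len(concatenated) // block_size) * block_size
--
--     input_ids = [concatenated[i:i+block_size] for i in range(0, total_length, block_size)]
--     labels = input_ids.copy()  # For language modeling, labels are the same as input_ids
--     result = {
--         "input_ids": input_ids,
--         "labels": labels
--     }
--
--     return result
-- ===== SOURCE B (Python) =====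
-- block_size = 512
--
-- def chunk_tokens(examples):
--     # Single streaming pass: keep a carry buffer, emit each full block as soon
--     # as it is available; the trailing partial block is never emitted.
--     input_ids = []
--     buffer = []
--     for seq in examples["input_ids"]:
--         buffer.extend(seq)
--         while len(buffer) >= block_size:
--             input_ids.append(buffer[:block_size])
--             buffer = buffer[block_size:]
--     labels = input_ids.copy()
--     return {
--         "input_ids": input_ids,
--         "labels": labels
--     }
-- ===== Notes on version B (the rewrite author's own statement) =====
-- stated objective: alternative
-- what changed: Replaced concatenate-everything-then-slice-by-range with a single streaming pass that keeps a carry buffer and emits each full 512-token block as soon as it is complete, never materializing the whole concatenation.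
import Mathlib
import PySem

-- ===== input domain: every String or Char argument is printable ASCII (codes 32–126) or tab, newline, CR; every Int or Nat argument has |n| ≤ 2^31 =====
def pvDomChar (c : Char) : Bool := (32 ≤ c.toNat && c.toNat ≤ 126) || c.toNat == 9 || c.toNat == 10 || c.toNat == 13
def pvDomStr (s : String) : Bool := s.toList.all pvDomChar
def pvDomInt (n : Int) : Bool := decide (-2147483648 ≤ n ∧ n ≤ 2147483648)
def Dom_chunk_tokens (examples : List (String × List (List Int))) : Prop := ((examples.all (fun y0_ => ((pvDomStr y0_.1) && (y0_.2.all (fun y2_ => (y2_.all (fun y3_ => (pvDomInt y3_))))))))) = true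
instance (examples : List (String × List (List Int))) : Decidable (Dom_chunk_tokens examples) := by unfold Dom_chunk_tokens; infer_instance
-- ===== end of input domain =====

-- B replaces A's concatenate-then-slice-by-range with a single streaming pass over the
-- sequences keeping a carry buffer and emitting each full 512-token block as it completes
-- (objective: alternative decomposition; same asymptotic cost).

-- ===== PORT A =====
def chunk_tokens (examples : List (String × List (List Int))) : List (String × List (List Int)) :=
  match (PySem.Dict.mk examples).get? "input_ids" with
  | none => []  -- Python raises KeyError here; excluded by Pre_chunk_tokens
  | some seqs =>
    let concatenated := seqs.foldl (fun acc seq => acc ++ seq) ([] : List Int)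
    let total_length : Int := PySem.Int.floordiv (concatenated.length : Int) 512 * 512
    let input_ids := (PySem.List.pyRange 0 total_length 512).map
        (fun i => PySem.List.slice concatenated (some i) (some (i + 512)))
    let labels := input_ids
    [("input_ids", input_ids), ("labels", labels)]

-- ===== PORT B =====
-- the inner 'while len(buffer) >= block_size' loop of Source B
def drainB (acc : List (List Int)) (buffer : List Int) : List (List Int) × List Int :=
  if h : 512 ≤ buffer.length then
    drainB (acc ++ [PySem.List.slice buffer none (some 512)])
           (PySem.List.slice buffer (some 512) none)
  else (acc, buffer)
termination_by buffer.length
decreasing_by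
  rw [PySem.List.slice_from buffer (show (0:Int) ≤ 512 by norm_num)]
  simp
  omega

def chunk_tokens_alt (examples : List (String × List (List Int))) : List (String × List (List Int)) :=
  match (PySem.Dict.mk examples).get? "input_ids" with
  | none => []  -- Python raises KeyError here; excluded by Pre_chunk_tokens
  | some seqs =>
    let st := seqs.foldl (fun st seq => drainB st.1 (st.2 ++ seq))
                (([] : List (List Int)), ([] : List Int))
    let input_ids := st.1
    let labels := input_ids
    [("input_ids", input_ids), ("labels", labels)]

-- ===== PRECONDITION & SPEC =====
-- Pre_ excludes exactly the inputs with no "input_ids" key, on which Python A (and B) raise KeyError.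
def Pre_chunk_tokens (examples : List (String × List (List Int))) : Prop :=
  ∃ p ∈ examples, p.1 = "input_ids"
instance (examples : List (String × List (List Int))) : Decidable (Pre_chunk_tokens examples) := by
  unfold Pre_chunk_tokens; infer_instance

def pvWitness_chunk_tokens : (List (String × List (List Int))) := [("input_ids", [[1, 2, 3]])]

def Spec_chunk_tokens (examples : List (String × List (List Int))) (out : List (String × List (List Int))) : Prop := out = chunk_tokens_alt examples
instance (examples : List (String × List (List Int))) (out : List (String × List (List Int))) : Decidable (Spec_chunk_tokens examples out) := by unfold Spec_chunk_tokens; infer_instance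

-- ===== CLAIM (what is proved, stated in full; the proofs are below) =====
def Claim_equal_chunk_tokens : Prop := ∀ (examples : List (String × List (List Int))), Dom_chunk_tokens examples → Pre_chunk_tokens examples → Spec_chunk_tokens examples (chunk_tokens examples)

-- ===== LEMMAS AND PROOFS =====

-- Reference chunking: the list of full 512-blocks of l, and the leftover tail.
def chunksSpec (l : List Int) : List (List Int) :=
  if h : 512 ≤ l.length then l.take 512 :: chunksSpec (l.drop 512) else []
termination_by l.length
decreasing_by simp; omega

def remSpec (l : List Int) : List Int :=
  if h : 512 ≤ l.length then remSpec (l.drop 512) else l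
termination_by l.length
decreasing_by simp; omega

lemma chunksSpec_pos {l : List Int} (h : 512 ≤ l.length) :
    chunksSpec l = l.take 512 :: chunksSpec (l.drop 512) := by
  rw [chunksSpec, dif_pos h]

lemma chunksSpec_neg {l : List Int} (h : l.length < 512) : chunksSpec l = [] := by
  rw [chunksSpec, dif_neg (by omega)]

lemma remSpec_pos {l : List Int} (h : 512 ≤ l.length) : remSpec l = remSpec (l.drop 512) := by
  rw [remSpec, dif_pos h]

lemma remSpec_neg {l : List Int} (h : l.length < 512) : remSpec l = l := by
  rw [remSpec, dif_neg (by omega)]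

lemma remSpec_length (l : List Int) : (remSpec l).length < 512 := by
  fun_induction remSpec l with
  | case1 l h ih => exact ih
  | case2 l h => omega

lemma drainB_eq (acc : List (List Int)) (buf : List Int) :
    drainB acc buf = (acc ++ chunksSpec buf, remSpec buf) := by
  fun_induction drainB acc buf with
  | case1 acc buf h ih =>
    rw [ih, PySem.List.slice_to buf (show (0:Int) ≤ 512 by norm_num),
        PySem.List.slice_from buf (show (0:Int) ≤ 512 by norm_num)]
    rw [chunksSpec_pos h, remSpec_pos h]
    simp
  | case2 acc buf h =>
    rw [chunksSpec_neg (by omega), remSpec_neg (by omega)]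
    simp

lemma chunksSpec_append (a b : List Int) :
    chunksSpec (a ++ b) = chunksSpec a ++ chunksSpec (remSpec a ++ b) := by
  fun_induction chunksSpec a with
  | case1 a h ih =>
    have h' : 512 ≤ (a ++ b).length := by simp; omega
    rw [chunksSpec_pos h', List.take_append_of_le_length h,
        List.drop_append_of_le_length h, ih, remSpec_pos h, List.cons_append]
  | case2 a h =>
    rw [remSpec_neg (show a.length < 512 by omega)]
    simp

lemma remSpec_append (a b : List Int) :
    remSpec (a ++ b) = remSpec (remSpec a ++ b) := by
  fun_induction remSpec a with
  | case1 a h ih =>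
    have h' : 512 ≤ (a ++ b).length := by simp; omega
    rw [remSpec_pos h', List.drop_append_of_le_length h, ih]
  | case2 a h => rfl

lemma fold_drain (seqs : List (List Int)) (acc : List (List Int)) (buf : List Int)
    (hb : buf.length < 512) :
    seqs.foldl (fun st seq => drainB st.1 (st.2 ++ seq)) (acc, buf) =
      (acc ++ chunksSpec (buf ++ seqs.flatten), remSpec (buf ++ seqs.flatten)) := by
  induction seqs generalizing acc buf with
  | nil => simp [chunksSpec_neg hb, remSpec_neg hb]
  | cons s seqs ih =>
    simp only [List.foldl_cons, List.flatten_cons]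
    rw [drainB_eq, ih _ _ (remSpec_length _)]
    rw [← List.append_assoc buf s, chunksSpec_append (buf ++ s) seqs.flatten,
        remSpec_append (buf ++ s) seqs.flatten]
    simp

-- A's comprehension, in pure Nat drop/take form, computes chunksSpec.
lemma range_chunks (l : List Int) :
    (List.range (l.length / 512)).map (fun k => (l.drop (512 * k)).take 512) = chunksSpec l := by
  fun_induction chunksSpec l with
  | case1 l h ih =>
    have h1 : l.length / 512 = (l.drop 512).length / 512 + 1 := by simp; omega
    rw [h1, List.range_succ_eq_map, List.map_cons, List.map_map]
    have ht : List.map ((fun k => List.take 512 (List.drop (512 * k) l)) ∘ Nat.succ)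
        (List.range ((List.drop 512 l).length / 512)) = chunksSpec (List.drop 512 l) := by
      rw [← ih]
      apply List.map_congr_left
      intro k _
      simp only [Function.comp]
      rw [List.drop_drop]
      congr 2
      omega
    rw [ht]
    simp
  | case2 l h =>
    have h0 : l.length / 512 = 0 := by omega
    rw [h0]
    simp

-- A's slice comprehension equals chunksSpec.
lemma A_side (l : List Int) :
    (PySem.List.pyRange 0 (PySem.Int.floordiv (l.length : Int) 512 * 512) 512).map
      (fun i => PySem.List.slice l (some i) (some (i + 512))) = chunksSpec l := by
  have hm : PySem.Int.floordiv (l.length : Int) 512 * 512 = ((l.length / 512 * 512 : Nat) : Int) := by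
    rw [PySem.Int.floordiv_eq_ediv_of_pos (show (0:Int) < 512 by norm_num)]
    omega
  rw [hm, PySem.List.pyRange_of_pos _ _ (show (0:Int) < 512 by norm_num)]
  have hc : (if (0:Int) < ((l.length / 512 * 512 : Nat) : Int) then
      ((((l.length / 512 * 512 : Nat) : Int) - 0 + 512 - 1) / 512).toNat else 0) = l.length / 512 := by
    split_ifs with h0 <;> omega
  rw [hc, List.map_map, ← range_chunks l]
  apply List.map_congr_left
  intro k _
  have e1 : (0 : Int) + 512 * (k : Int) = ((512 * k : Nat) : Int) := by push_cast; ring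
  have e2 : (0 : Int) + 512 * (k : Int) + 512 = ((512 * k + 512 : Nat) : Int) := by push_cast; ring
  simp only [Function.comp]
  rw [e2, e1, PySem.List.slice_natCast]
  congr 1
  omega

lemma foldl_append_flatten (seqs : List (List Int)) (acc : List Int) :
    seqs.foldl (fun a s => a ++ s) acc = acc ++ seqs.flatten := by
  induction seqs generalizing acc with
  | nil => simp
  | cons s ss ih =>
    simp only [List.foldl_cons, List.flatten_cons]
    rw [ih, List.append_assoc]

lemma mk_get?_none {items : List (String × List (List Int))}
    (h : (PySem.Dict.mk items).get? "input_ids" = none) : ¬ ∃ p ∈ items, p.1 = "input_ids" := by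
  induction items with
  | nil => simp
  | cons p rest ih =>
    rw [show (PySem.Dict.mk (p :: rest)) = PySem.Dict.mk ((p.1, p.2) :: rest) by rfl,
        PySem.Dict.get?_mk_cons] at h
    by_cases hk : (p.1 == "input_ids") = true
    · rw [if_pos hk] at h
      exact absurd h (by simp)
    · rw [if_neg hk] at h
      intro hx
      rcases hx with ⟨q, hq, hq1⟩
      rcases List.mem_cons.mp hq with hq2 | hq2
      · subst hq2
        exact hk (by simp [hq1])
      · exact ih h ⟨q, hq2, hq1⟩

-- ===== VERDICT (by name: the statement is the Claim_ definition above) =====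
theorem chunk_tokens_spec : Claim_equal_chunk_tokens := by
  intro examples hdom hpre
  unfold Spec_chunk_tokens
  cases hg : (PySem.Dict.mk examples).get? "input_ids" with
  | none => exact absurd hpre (mk_get?_none hg)
  | some seqs =>
    have hB : seqs.foldl (fun st seq => drainB st.1 (st.2 ++ seq))
        (([] : List (List Int)), ([] : List Int)) =
        ([] ++ chunksSpec ([] ++ seqs.flatten), remSpec ([] ++ seqs.flatten)) :=
      fold_drain seqs [] [] (by simp)
    simp only [chunk_tokens, chunk_tokens_alt, hg, foldl_append_flatten, hB,
      List.nil_append, A_side]
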